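-- pv_equiv track=rewrite | github.com/KexinNiu/ppi_embed | model/loaddata.py | gene_pos
-- ===== SOURCE A (Python) =====
-- def gene_pos(prlist,allpairs):
--     # input a list of protein lists
--     # output a list of dict
--     prsetlist= prlist
--
--     ddposlist=[]
--     for i in range(0,len(prlist)):
--         # prset = set(prlist[i])
--         # prsetlist.append(prset)
--         ddposlist.append({})
--     for p1,p2 in allpairs:
--         for i in range(0,len(prlist)):
--             proteins = prsetlist[i]
--             # ddpos = ddposlist[i]
--             if p1 in proteins and p2 in proteins:
--                 try:
--                     ddposlist[i][p1].append(p2)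
--                 except:
--                     ddposlist[i][p1]=[p2]
--                 try:
--                     ddposlist[i][p2].append(p1)
--                 except:
--                     ddposlist[i][p2]=[p1]
--     return ddposlist
--
--
--     return #dataframe name, interact proteins
-- ===== SOURCE B (Python) =====
-- def gene_pos(prlist, allpairs):
--     # Inverted index: protein -> set of indices of the lists that contain it;
--     # each pair then touches only the lists containing both endpoints.
--     membership = {}
--     for i, proteins in enumerate(prlist):
--         for p in proteins:
--             membership.setdefault(p, set()).add(i)
--     ddposlist = [{} for _ in prlist]
--     empty = set()
--     for p1, p2 in allpairs:
--         for i in membership.get(p1, empty) & membership.get(p2, empty):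
--             d = ddposlist[i]
--             d.setdefault(p1, []).append(p2)
--             d.setdefault(p2, []).append(p1)
--     return ddposlist
-- ===== Notes on version B (the rewrite author's own statement) =====
-- stated objective: faster
-- what changed: B builds an inverted index protein->set of containing-list indices once, then each pair intersects two index sets and updates only the dicts of lists containing both endpoints, replacing A's per-pair linear scan of every protein list.
import Mathlib
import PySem

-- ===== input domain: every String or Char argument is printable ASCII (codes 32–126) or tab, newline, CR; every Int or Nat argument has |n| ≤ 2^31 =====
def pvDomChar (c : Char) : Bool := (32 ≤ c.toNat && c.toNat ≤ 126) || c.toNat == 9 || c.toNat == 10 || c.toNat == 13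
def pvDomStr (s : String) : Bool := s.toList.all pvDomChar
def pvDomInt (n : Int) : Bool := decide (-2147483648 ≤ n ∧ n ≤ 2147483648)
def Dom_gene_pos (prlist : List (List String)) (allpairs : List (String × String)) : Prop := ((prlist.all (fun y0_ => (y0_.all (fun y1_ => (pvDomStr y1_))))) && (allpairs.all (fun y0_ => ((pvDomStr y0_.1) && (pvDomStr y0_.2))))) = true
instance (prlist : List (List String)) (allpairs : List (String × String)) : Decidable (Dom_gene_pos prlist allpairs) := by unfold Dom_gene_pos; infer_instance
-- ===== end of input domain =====

-- B builds an inverted index protein -> set of containing-list indices once, then each pair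
-- updates only the dicts of the lists containing both endpoints (objective: faster).

-- ===== PORT A =====
-- try: d[k].append(v)  except: d[k] = [v]
def pvTryAppend (d : PySem.Dict String (List String)) (k v : String) :
    PySem.Dict String (List String) :=
  match d.get? k with
  | some l => d.insert k (l ++ [v])
  | none   => d.insert k [v]

def gene_pos (prlist : List (List String)) (allpairs : List (String × String)) :
    List (List (String × List String)) :=
  let prsetlist := prlist
  -- first loop: ddposlist.append({}) for each i in range(len(prlist))
  let ddposlist : List (PySem.Dict String (List String)) :=
    (List.range prlist.length).foldl (fun acc _ => acc ++ [PySem.Dict.empty]) []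
  -- second loop: for p1,p2 in allpairs: for i in range(len(prlist)): …
  let final := allpairs.foldl (fun dd p =>
    (List.range prlist.length).foldl (fun dd i =>
      let proteins := prsetlist.getD i []          -- i always in range: indices come from range(len)
      if proteins.contains p.1 && proteins.contains p.2 then
        dd.set i (pvTryAppend (pvTryAppend (dd.getD i PySem.Dict.empty) p.1 p.2) p.2 p.1)
      else dd) dd) ddposlist
  final.map (·.items)                              -- dict → assoc list (type convention)

-- ===== PORT B =====
-- d.setdefault(k, []).append(v)
def pvSetdefaultAppend (d : PySem.Dict String (List String)) (k v : String) :
    PySem.Dict String (List String) :=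
  d.insert k (d.getD k [] ++ [v])

-- membership.setdefault(p, set()).add(i)
def pvAddIdx (m : PySem.Dict String (PySem.Set Int)) (p : String) (i : Int) :
    PySem.Dict String (PySem.Set Int) :=
  m.insert p (PySem.Set.add (m.getD p PySem.Set.empty) i)

-- for i, proteins in enumerate(prlist): for p in proteins: membership.setdefault(p, set()).add(i)
def pvBuildMem (prlist : List (List String)) : PySem.Dict String (PySem.Set Int) :=
  (PySem.List.enumerate prlist).foldl
    (fun m ip => ip.2.foldl (fun m p => pvAddIdx m p ip.1) m) PySem.Dict.empty

def gene_pos_alt (prlist : List (List String)) (allpairs : List (String × String)) :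
    List (List (String × List String)) :=
  let membership := pvBuildMem prlist
  let ddposlist : List (PySem.Dict String (List String)) :=
    prlist.map (fun _ => PySem.Dict.empty)
  (allpairs.foldl (fun dd p =>
    -- membership.get(p1, empty) & membership.get(p2, empty); a pair's updates hit independent
    -- slots, so the result does not depend on the set's iteration order
    let common := PySem.Set.inter (membership.getD p.1 PySem.Set.empty)
                                  (membership.getD p.2 PySem.Set.empty)
    common.foldl (fun dd i =>
      -- i comes from enumerate(prlist): always a valid nonnegative index
      dd.set i.toNat
        (pvSetdefaultAppend (pvSetdefaultAppend (dd.getD i.toNat PySem.Dict.empty) p.1 p.2) p.2 p.1))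
      dd) ddposlist).map (·.items)

-- ===== PRECONDITION & SPEC =====
def Spec_gene_pos (prlist : List (List String)) (allpairs : List (String × String)) (out : List (List (String × List String))) : Prop := out = gene_pos_alt prlist allpairs
instance (prlist : List (List String)) (allpairs : List (String × String)) (out : List (List (String × List String))) : Decidable (Spec_gene_pos prlist allpairs out) := by unfold Spec_gene_pos; infer_instance

-- ===== CLAIM (what is proved, stated in full; the proofs are below) =====
def Claim_equal_gene_pos : Prop := ∀ (prlist : List (List String)) (allpairs : List (String × String)), Dom_gene_pos prlist allpairs → Spec_gene_pos prlist allpairs (gene_pos prlist allpairs)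

-- ===== LEMMAS AND PROOFS =====

-- the single-dict step both programs perform for one list of proteins and one pair
def pvStep (proteins : List String) (d : PySem.Dict String (List String)) (p : String × String) :
    PySem.Dict String (List String) :=
  if proteins.contains p.1 && proteins.contains p.2 then
    pvTryAppend (pvTryAppend d p.1 p.2) p.2 p.1
  else d

-- the two dict-update helpers agree
lemma pvTryAppend_eq (d : PySem.Dict String (List String)) (k v : String) :
    pvTryAppend d k v = pvSetdefaultAppend d k v := by
  unfold pvTryAppend pvSetdefaultAppend
  cases h : d.get? k with
  | none => simp [PySem.Dict.getD_eq_get?_getD, h]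
  | some l => simp [PySem.Dict.getD_eq_get?_getD, h]

-- A's initial loop builds a list of n empty dicts
lemma pvInit (n : Nat) :
    (List.range n).foldl (fun acc _ => acc ++ [(PySem.Dict.empty : PySem.Dict String (List String))]) []
      = List.replicate n PySem.Dict.empty := by
  suffices h : ∀ (l : List Nat) (acc : List (PySem.Dict String (List String))),
      l.foldl (fun acc _ => acc ++ [(PySem.Dict.empty : PySem.Dict String (List String))]) acc
        = acc ++ List.replicate l.length PySem.Dict.empty by
    simp [h (List.range n) []]
  intro l
  induction l with
  | nil => intro acc; simp
  | cons a l ih => intro acc; simp [ih, List.replicate_succ]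

-- zipWith with a constant second projection
lemma pvZipWith_id {α β : Type} : ∀ (a : List α) (b : List β), b.length = a.length →
    List.zipWith (fun _ d => d) a b = b := by
  intro a
  induction a with
  | nil => intro b h; simp [List.eq_nil_of_length_eq_zero h]
  | cons x a ih =>
      intro b h
      cases b with
      | nil => simp at h
      | cons y b => simp at h; simp [ih b h]

-- fusing two zipWith over the same first list
lemma pvZipWith_comp {α β : Type} (f g : α → β → β) : ∀ (a : List α) (b : List β),
    List.zipWith f a (List.zipWith g a b) = List.zipWith (fun x d => f x (g x d)) a b := by
  intro a
  induction a with
  | nil => intro b; simp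
  | cons x a ih =>
      intro b
      cases b with
      | nil => simp
      | cons y b => simp [ih]

-- zipWith against replicate is a map
lemma pvZipWith_replicate {α β γ : Type} (f : α → β → γ) (c : β) : ∀ (l : List α),
    List.zipWith f l (List.replicate l.length c) = l.map (fun x => f x c) := by
  intro l
  induction l with
  | nil => simp
  | cons x l ih => simp [List.replicate_succ, ih]

-- a fold whose step preserves a fixed head acts on the tail
lemma pvFoldl_cons_lift {γ : Type} (e : PySem.Dict String (List String))
    (F F' : List (PySem.Dict String (List String)) → γ → List (PySem.Dict String (List String)))
    (h : ∀ rest i, F (e :: rest) i = e :: F' rest i) :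
    ∀ (is : List γ) (rest : List (PySem.Dict String (List String))),
      is.foldl F (e :: rest) = e :: is.foldl F' rest := by
  intro is
  induction is with
  | nil => intro rest; rfl
  | cons i is ih => intro rest; simp only [List.foldl_cons, h, ih]

-- A's inner loop over range(len(prlist)) updates each slot pointwise
lemma pvInner (p : String × String) :
    ∀ (prl : List (List String)) (dd : List (PySem.Dict String (List String))),
      dd.length = prl.length →
      (List.range prl.length).foldl (fun dd i =>
        if (prl.getD i []).contains p.1 && (prl.getD i []).contains p.2 then
          dd.set i (pvTryAppend (pvTryAppend (dd.getD i PySem.Dict.empty) p.1 p.2) p.2 p.1)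
        else dd) dd
      = List.zipWith (fun pr d => pvStep pr d p) prl dd := by
  intro prl
  induction prl with
  | nil =>
      intro dd h
      simp [List.eq_nil_of_length_eq_zero h]
  | cons pr prl ih =>
      intro dd h
      cases dd with
      | nil => simp at h
      | cons d dd' =>
        simp only [List.length_cons, Nat.succ.injEq] at h
        rw [List.length_cons, List.range_succ_eq_map, List.foldl_cons]
        have h0 : (if (( (pr :: prl).getD 0 [])).contains p.1 && ((pr :: prl).getD 0 []).contains p.2 then
            (d :: dd').set 0 (pvTryAppend (pvTryAppend ((d :: dd').getD 0 PySem.Dict.empty) p.1 p.2) p.2 p.1)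
          else d :: dd') = pvStep pr d p :: dd' := by
          simp only [List.getD_cons_zero, List.set_cons_zero]
          unfold pvStep
          split_ifs <;> rfl
        rw [h0, List.foldl_map]
        rw [pvFoldl_cons_lift (pvStep pr d p) _
          (fun dd i =>
            if (prl.getD i []).contains p.1 && (prl.getD i []).contains p.2 then
              dd.set i (pvTryAppend (pvTryAppend (dd.getD i PySem.Dict.empty) p.1 p.2) p.2 p.1)
            else dd)
          (by
            intro rest i
            simp only [List.getD_cons_succ, List.set_cons_succ]
            split_ifs <;> rfl)]
        rw [ih dd' h]
        simp [List.zipWith]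

-- A's outer loop over allpairs is a pointwise fold of pvStep
lemma pvOuter (prl : List (List String)) :
    ∀ (ps : List (String × String)) (dd : List (PySem.Dict String (List String))),
      dd.length = prl.length →
      ps.foldl (fun dd p =>
        (List.range prl.length).foldl (fun dd i =>
          if (prl.getD i []).contains p.1 && (prl.getD i []).contains p.2 then
            dd.set i (pvTryAppend (pvTryAppend (dd.getD i PySem.Dict.empty) p.1 p.2) p.2 p.1)
          else dd) dd) dd
      = List.zipWith (fun pr d => ps.foldl (pvStep pr) d) prl dd := by
  intro ps
  induction ps with
  | nil => intro dd h; simp [pvZipWith_id prl dd h]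
  | cons p ps ih =>
      intro dd h
      rw [List.foldl_cons, pvInner p prl dd h]
      have hlen : (List.zipWith (fun pr d => pvStep pr d p) prl dd).length = prl.length := by
        simp [h]
      rw [ih _ hlen, pvZipWith_comp]
      simp [List.foldl_cons]

-- ===== B-side: the inverted index characterisation =====

-- inner fold over one protein list adds exactly index j for its members
lemma pvMemInner (j : Int) :
    ∀ (pr : List String) (m : PySem.Dict String (PySem.Set Int)) (p : String) (i : Int),
      i ∈ (pr.foldl (fun m q => pvAddIdx m q j) m).getD p PySem.Set.empty ↔
        i ∈ m.getD p PySem.Set.empty ∨ (p ∈ pr ∧ i = j) := by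
  intro pr
  induction pr with
  | nil => intro m p i; simp
  | cons q pr ih =>
      intro m p i
      rw [List.foldl_cons, ih]
      unfold pvAddIdx
      by_cases hpq : p = q
      · subst hpq
        rw [PySem.Dict.getD_insert]
        simp [PySem.Set.mem_add]
        tauto
      · rw [PySem.Dict.getD_insert]
        simp [hpq]

-- the inner fold preserves nodup of every value
lemma pvMemInnerNodup (j : Int) :
    ∀ (pr : List String) (m : PySem.Dict String (PySem.Set Int)),
      (∀ p, (m.getD p PySem.Set.empty).Nodup) →
      ∀ p, ((pr.foldl (fun m q => pvAddIdx m q j) m).getD p PySem.Set.empty).Nodup := by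
  intro pr
  induction pr with
  | nil => intro m h p; exact h p
  | cons q pr ih =>
      intro m h p
      refine ih _ (fun p' => ?_) p
      unfold pvAddIdx
      rw [PySem.Dict.getD_insert]
      by_cases hpq : p' = q
      · rw [if_pos hpq]
        exact PySem.Set.nodup_add _ _ (h q)
      · rw [if_neg hpq]
        exact h p'

-- characterisation of the whole inverted index, generalised over the enumeration start
lemma pvMemFold :
    ∀ (xs : List (List String)) (s : Int) (m : PySem.Dict String (PySem.Set Int)) (p : String) (i : Int),
      i ∈ ((PySem.List.enumerate xs s).foldl
            (fun m ip => ip.2.foldl (fun m q => pvAddIdx m q ip.1) m) m).getD p PySem.Set.empty ↔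
        i ∈ m.getD p PySem.Set.empty ∨
          ∃ (k : Nat), ∃ (h : k < xs.length), i = s + k ∧ p ∈ xs[k] := by
  intro xs
  induction xs with
  | nil => intro s m p i; simp [PySem.List.enumerate_nil]
  | cons pr xs ih =>
      intro s m p i
      rw [PySem.List.enumerate_cons, List.foldl_cons, ih, pvMemInner]
      constructor
      · rintro (⟨h | ⟨hp, hi⟩⟩ | ⟨k, hk, hi, hp⟩)
        · exact Or.inl h
        · exact Or.inr ⟨0, by simp, by simpa using hi, by simpa using hp⟩
        · exact Or.inr ⟨k + 1, by simpa using hk, by push_cast at hi ⊢; omega, by simpa using hp⟩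
      · rintro (h | ⟨k, hk, hi, hp⟩)
        · exact Or.inl (Or.inl h)
        · cases k with
          | zero => exact Or.inl (Or.inr ⟨by simpa using hp, by simpa using hi⟩)
          | succ k =>
              refine Or.inr ⟨k, by simpa using hk, by push_cast at hi ⊢; omega, by simpa using hp⟩

-- nodup of every value of the inverted index
lemma pvMemFoldNodup :
    ∀ (xs : List (List String)) (s : Int) (m : PySem.Dict String (PySem.Set Int)),
      (∀ p, (m.getD p PySem.Set.empty).Nodup) →
      ∀ p, (((PySem.List.enumerate xs s).foldl
            (fun m ip => ip.2.foldl (fun m q => pvAddIdx m q ip.1) m) m).getD p PySem.Set.empty).Nodup := by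
  intro xs
  induction xs with
  | nil => intro s m h p; simpa [PySem.List.enumerate_nil] using h p
  | cons pr xs ih =>
      intro s m h p
      rw [PySem.List.enumerate_cons, List.foldl_cons]
      exact ih _ _ (pvMemInnerNodup s pr m h) p

lemma pvBuildMem_mem (prlist : List (List String)) (p : String) (i : Int) :
    i ∈ (pvBuildMem prlist).getD p PySem.Set.empty ↔
      ∃ (k : Nat), ∃ (h : k < prlist.length), i = (k : Int) ∧ p ∈ prlist[k] := by
  unfold pvBuildMem
  rw [pvMemFold]
  simp [PySem.Dict.getD_empty]

lemma pvBuildMem_nodup (prlist : List (List String)) (p : String) :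
    ((pvBuildMem prlist).getD p PySem.Set.empty).Nodup := by
  unfold pvBuildMem
  exact pvMemFoldNodup prlist 0 PySem.Dict.empty (by intro p; simp [PySem.Dict.getD_empty]) p

-- scatter: folding set-updates over a nodup list of in-range indices acts slotwise
lemma pvScatter (f : PySem.Dict String (List String) → PySem.Dict String (List String)) :
    ∀ (common : List Int) (dd : List (PySem.Dict String (List String))),
      common.Nodup →
      (∀ i ∈ common, 0 ≤ i ∧ i.toNat < dd.length) →
      common.foldl (fun dd i => dd.set i.toNat (f (dd.getD i.toNat PySem.Dict.empty))) dd
        = dd.mapIdx (fun j d => if (j : Int) ∈ common then f d else d) := by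
  intro common
  induction common with
  | nil =>
      intro dd _ _
      apply List.ext_getElem <;> simp
  | cons i rest ih =>
      intro dd hnd hbd
      obtain ⟨hi0, hilt⟩ := hbd i (by simp)
      have hnd' := hnd
      rw [List.nodup_cons] at hnd'
      obtain ⟨hinot, hrestnd⟩ := hnd'
      rw [List.foldl_cons]
      rw [ih _ hrestnd (by
        intro j hj
        have := hbd j (List.mem_cons_of_mem _ hj)
        simpa using this)]
      apply List.ext_getElem
      · simp
      · intro j hj1 hj2
        simp only [List.length_mapIdx, List.length_set] at hj1 hj2
        rw [List.getElem_mapIdx, List.getElem_mapIdx]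
        by_cases hji : j = i.toNat
        · subst hji
          have hji' : ((i.toNat : Nat) : Int) = i := by omega
          have hnr : ¬ (((i.toNat : Nat) : Int) ∈ rest) := by rw [hji']; exact hinot
          rw [if_neg hnr, if_pos (by rw [hji']; exact List.mem_cons_self)]
          rw [List.getElem_set_self (by simpa using hilt)]
          congr 1
          rw [List.getD_eq_getElem?_getD, List.getElem?_eq_getElem hilt]
          rfl
        · have hne : ¬ ((j : Int) = i) := by omega
          rw [List.getElem_set_ne (by omega)]
          by_cases hr : (j : Int) ∈ rest
          · rw [if_pos hr, if_pos (List.mem_cons_of_mem _ hr)]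
          · rw [if_neg hr, if_neg (by simp [hne, hr])]

-- mapIdx with a per-index condition is a zipWith when the condition reads the other list
lemma pvMapIdx_zipWith (p : String × String) (common : List Int) :
    ∀ (prl : List (List String)) (dd : List (PySem.Dict String (List String))),
      dd.length = prl.length →
      (∀ (j : Nat), j < prl.length → (((j : Int) ∈ common) ↔ ((prl.getD j []).contains p.1 ∧ (prl.getD j []).contains p.2))) →
      dd.mapIdx (fun j d => if (j : Int) ∈ common then
          pvSetdefaultAppend (pvSetdefaultAppend d p.1 p.2) p.2 p.1 else d)
        = List.zipWith (fun pr d => pvStep pr d p) prl dd := by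
  intro prl dd hlen hcond
  apply List.ext_getElem
  · simp [hlen]
  · intro j hj1 hj2
    simp only [List.getElem_mapIdx, List.getElem_zipWith]
    have hjp : j < prl.length := by simp at hj2; exact hj2.1
    have hc := hcond j hjp
    rw [List.getD_eq_getElem?_getD, List.getElem?_eq_getElem hjp] at hc
    simp only [Option.getD_some] at hc
    unfold pvStep
    rw [pvTryAppend_eq, pvTryAppend_eq]
    by_cases h : (j : Int) ∈ common
    · obtain ⟨h1, h2⟩ := hc.mp h
      rw [if_pos h, if_pos (by rw [h1, h2]; rfl)]
    · have hb : ¬ ((prl[j].contains p.1 && prl[j].contains p.2) = true) := by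
        intro hb
        rw [Bool.and_eq_true] at hb
        exact h (hc.mpr ⟨hb.1, hb.2⟩)
      rw [if_neg h, if_neg hb]

-- B's per-pair scatter over the intersection equals A's slotwise step
lemma pvAltInner (prl : List (List String)) (p : String × String)
    (dd : List (PySem.Dict String (List String))) (hlen : dd.length = prl.length) :
    (PySem.Set.inter ((pvBuildMem prl).getD p.1 PySem.Set.empty)
                     ((pvBuildMem prl).getD p.2 PySem.Set.empty)).foldl
      (fun dd i => dd.set i.toNat
        (pvSetdefaultAppend (pvSetdefaultAppend (dd.getD i.toNat PySem.Dict.empty) p.1 p.2) p.2 p.1)) dd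
      = List.zipWith (fun pr d => pvStep pr d p) prl dd := by
  set common := PySem.Set.inter ((pvBuildMem prl).getD p.1 PySem.Set.empty)
                                ((pvBuildMem prl).getD p.2 PySem.Set.empty) with hc
  have hmem : ∀ i, i ∈ common ↔
      (i ∈ (pvBuildMem prl).getD p.1 PySem.Set.empty ∧ i ∈ (pvBuildMem prl).getD p.2 PySem.Set.empty) := by
    intro i; rw [hc]; exact PySem.Set.mem_inter _ _ i
  have hnd : common.Nodup := by
    rw [hc]; exact PySem.Set.nodup_inter _ _ (pvBuildMem_nodup prl p.1)
  have hbd : ∀ i ∈ common, 0 ≤ i ∧ i.toNat < dd.length := by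
    intro i hi
    obtain ⟨h1, _⟩ := (hmem i).mp hi
    obtain ⟨k, hk, hik, _⟩ := (pvBuildMem_mem prl p.1 i).mp h1
    constructor
    · omega
    · rw [hlen]; omega
  rw [pvScatter (fun d => pvSetdefaultAppend (pvSetdefaultAppend d p.1 p.2) p.2 p.1) common dd hnd hbd]
  apply pvMapIdx_zipWith
  · exact hlen
  · intro j hjlt
    rw [hmem, pvBuildMem_mem, pvBuildMem_mem]
    constructor
    · rintro ⟨⟨k1, hk1, he1, hp1⟩, ⟨k2, hk2, he2, hp2⟩⟩
      have : k1 = j := by omega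
      subst this
      have : k2 = k1 := by omega
      subst this
      rw [List.getD_eq_getElem?_getD, List.getElem?_eq_getElem hk1]
      exact ⟨by simpa using hp1, by simpa using hp2⟩
    · rintro ⟨h1, h2⟩
      rw [List.getD_eq_getElem?_getD, List.getElem?_eq_getElem hjlt] at h1 h2
      simp only [Option.getD_some] at h1 h2
      exact ⟨⟨j, hjlt, rfl, by simpa using h1⟩, ⟨j, hjlt, rfl, by simpa using h2⟩⟩

-- B's outer loop over allpairs is the same pointwise fold of pvStep as A's
lemma pvAltOuter (prl : List (List String)) :
    ∀ (ps : List (String × String)) (dd : List (PySem.Dict String (List String))),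
      dd.length = prl.length →
      ps.foldl (fun dd p =>
        (PySem.Set.inter ((pvBuildMem prl).getD p.1 PySem.Set.empty)
                         ((pvBuildMem prl).getD p.2 PySem.Set.empty)).foldl
          (fun dd i => dd.set i.toNat
            (pvSetdefaultAppend (pvSetdefaultAppend (dd.getD i.toNat PySem.Dict.empty) p.1 p.2) p.2 p.1)) dd) dd
      = List.zipWith (fun pr d => ps.foldl (pvStep pr) d) prl dd := by
  intro ps
  induction ps with
  | nil => intro dd h; simp [pvZipWith_id prl dd h]
  | cons p ps ih =>
      intro dd h
      rw [List.foldl_cons, pvAltInner prl p dd h]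
      have hlen : (List.zipWith (fun pr d => pvStep pr d p) prl dd).length = prl.length := by
        simp [h]
      rw [ih _ hlen, pvZipWith_comp]
      simp [List.foldl_cons]

-- ===== VERDICT (by name: the statement is the Claim_ definition above) =====
theorem gene_pos_spec : Claim_equal_gene_pos := by
  intro prlist allpairs _
  unfold Spec_gene_pos gene_pos gene_pos_alt
  simp only []
  rw [pvInit, pvOuter prlist allpairs _ (by simp),
      pvAltOuter prlist allpairs _ (by simp)]
  rw [pvZipWith_replicate]
  have : prlist.map (fun _ => (PySem.Dict.empty : PySem.Dict String (List String)))
      = List.replicate prlist.length PySem.Dict.empty := by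
    simp [List.map_const']
  rw [this, pvZipWith_replicate]
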